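-- pv_equiv track=rewrite | github.com/KevinStrong/advent | day_7/day_7.py | build_eligible_moves
-- ===== SOURCE A (Python) =====
-- def build_eligible_moves(instructions, completed_moves, moves_remaining):
--     eligible_moves = []
--     for move in moves_remaining:
--         move_has_dependency = False
--         for instruction in instructions:
--             if instruction[1] == move and instruction[0] not in completed_moves:
--                 move_has_dependency = True
--         if not move_has_dependency:
--             eligible_moves.append(move)
--     return eligible_moves
-- ===== SOURCE B (Python) =====
-- def build_eligible_moves(instructions, completed_moves, moves_remaining):
--     completed = set(completed_moves)
--     blocked = {instr[1] for instr in instructions if instr[0] not in completed}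
--     return [move for move in moves_remaining if move not in blocked]
-- ===== Notes on version B (the rewrite author's own statement) =====
-- stated objective: faster
-- what changed: One pass over instructions builds a blocked set, then moves_remaining is filtered against it, replacing the per-move rescan of all instructions.
import Mathlib
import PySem

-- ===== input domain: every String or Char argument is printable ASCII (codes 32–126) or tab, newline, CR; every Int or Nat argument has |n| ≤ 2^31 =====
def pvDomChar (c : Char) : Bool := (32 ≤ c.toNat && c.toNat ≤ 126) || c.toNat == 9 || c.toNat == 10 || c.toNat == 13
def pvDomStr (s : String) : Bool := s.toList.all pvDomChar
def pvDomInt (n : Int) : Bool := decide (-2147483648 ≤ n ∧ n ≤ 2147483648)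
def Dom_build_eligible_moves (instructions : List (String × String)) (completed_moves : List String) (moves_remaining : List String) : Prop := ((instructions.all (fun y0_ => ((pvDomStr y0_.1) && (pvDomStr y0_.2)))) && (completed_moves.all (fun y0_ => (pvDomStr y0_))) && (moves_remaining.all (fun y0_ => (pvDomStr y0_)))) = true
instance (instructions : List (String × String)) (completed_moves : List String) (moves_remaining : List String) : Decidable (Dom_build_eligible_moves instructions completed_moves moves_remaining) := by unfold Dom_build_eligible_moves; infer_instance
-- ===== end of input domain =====

-- B replaces A's per-move rescan of instructions by one blocked set built in a single pass (objective: faster, asymptotically).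

-- ===== PORT A =====
def build_eligible_moves (instructions : List (String × String)) (completed_moves : List String) (moves_remaining : List String) : List String :=
  moves_remaining.foldl (fun eligible_moves move =>
    let move_has_dependency :=
      instructions.foldl (fun b instruction =>
        if instruction.2 == move && !(completed_moves.contains instruction.1) then true else b) false
    if !move_has_dependency then eligible_moves ++ [move] else eligible_moves) []

-- ===== PORT B =====
def build_eligible_moves_alt (instructions : List (String × String)) (completed_moves : List String) (moves_remaining : List String) : List String :=
  let completed : PySem.Set String := PySem.Set.ofList completed_moves
  let blocked : PySem.Set String :=
    instructions.foldl (fun s instr =>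
      if !(PySem.Set.contains completed instr.1) then PySem.Set.add s instr.2 else s) PySem.Set.empty
  moves_remaining.filter (fun move => !(PySem.Set.contains blocked move))

-- ===== PRECONDITION & SPEC =====
def Spec_build_eligible_moves (instructions : List (String × String)) (completed_moves : List String) (moves_remaining : List String) (out : List String) : Prop := out = build_eligible_moves_alt instructions completed_moves moves_remaining
instance (instructions : List (String × String)) (completed_moves : List String) (moves_remaining : List String) (out : List String) : Decidable (Spec_build_eligible_moves instructions completed_moves moves_remaining out) := by unfold Spec_build_eligible_moves; infer_instance

-- ===== CLAIM (what is proved, stated in full; the proofs are below) =====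
def Claim_equal_build_eligible_moves : Prop := ∀ (instructions : List (String × String)) (completed_moves : List String) (moves_remaining : List String), Dom_build_eligible_moves instructions completed_moves moves_remaining → Spec_build_eligible_moves instructions completed_moves moves_remaining (build_eligible_moves instructions completed_moves moves_remaining)

-- ===== LEMMAS AND PROOFS =====

-- A's inner flag loop computes "some instruction blocks `move`".
theorem pvA_inner (completed_moves : List String) (move : String) :
   ∀ (L : List (String × String)) (b : Bool),
    L.foldl (fun b instruction =>
      if instruction.2 == move && !(completed_moves.contains instruction.1) then true else b) b
    = (b || L.any (fun p => p.2 == move && !(completed_moves.contains p.1))) := by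
  intro L
  induction L with
  | nil => intro b; simp
  | cons p L ih =>
    intro b
    rw [List.foldl_cons, List.any_cons]
    cases h : (p.2 == move && !(completed_moves.contains p.1))
    · rw [if_neg Bool.false_ne_true, ih]
      simp only [Bool.false_or]
    · rw [if_pos rfl, ih]
      simp only [Bool.true_or, Bool.or_true]

theorem pvSet_contains_add (s : PySem.Set String) (x y : String) :
    PySem.Set.contains (PySem.Set.add s x) y = (PySem.Set.contains s y || y == x) := by
  simp only [PySem.Set.add]
  by_cases h : PySem.Set.contains s x = true
  · simp only [h]
    by_cases hy : y = x
    · subst hy; simp_all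
    · simp [hy]
  · simp only [h]
    by_cases hy : y = x <;> simp_all [PySem.Set.contains]

-- Membership in B's blocked set matches A's flag predicate.
theorem pvB_blocked (completed_moves : List String) (move : String) :
    ∀ (L : List (String × String)) (s : PySem.Set String),
    PySem.Set.contains
      (L.foldl (fun s instr =>
        if !(PySem.Set.contains (PySem.Set.ofList completed_moves) instr.1) then PySem.Set.add s instr.2 else s) s)
      move
    = (PySem.Set.contains s move || L.any (fun p => p.2 == move && !(completed_moves.contains p.1))) := by
  intro L
  induction L with
  | nil => intro s; simp
  | cons p L ih =>
    intro s
    have hc : PySem.Set.contains (PySem.Set.ofList completed_moves) p.1 = completed_moves.contains p.1 := by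
      simp
    rw [List.foldl_cons, List.any_cons]
    cases hx : completed_moves.contains p.1
    · rw [if_pos (by rw [hc, hx]; rfl), ih, pvSet_contains_add]
      have hswap : (move == p.2) = (p.2 == move) := by
        by_cases hq : move = p.2 <;> simp [hq, eq_comm]
      simp [Bool.or_assoc, hswap]
    · rw [if_neg (by rw [hc, hx]; simp), ih]
      simp

-- ===== VERDICT (by name: the statement is the Claim_ definition above) =====
theorem build_eligible_moves_spec : Claim_equal_build_eligible_moves := by
  intro instructions completed_moves moves_remaining _
  unfold Spec_build_eligible_moves build_eligible_moves build_eligible_moves_alt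
  simp only []
  rw [PySem.List.foldl_append_if_eq_filter]
  simp only [List.nil_append]
  apply List.filter_congr
  intro move _
  rw [pvA_inner, pvB_blocked]
  simp
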